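-- pv_equiv track=rewrite | github.com/lanliwz/JCTaxLedger | etl/downloadBrookhavenTaxStatement.py | _parse_item_values
-- ===== SOURCE A (Python) =====
-- def _parse_item_values(raw_values):
--     items = []
--     for raw_value in raw_values:
--         if not raw_value:
--             continue
--         for value in str(raw_value).split(","):
--             value = value.strip()
--             if value:
--                 items.append(value)
--     return items
-- ===== SOURCE B (Python) =====
-- def _flush(buf, items):
--     while buf and buf[0].isspace():
--         buf.pop(0)
--     while buf and buf[-1].isspace():
--         buf.pop()
--     if buf:
--         items.append("".join(buf))
--
-- def _parse_item_values(raw_values):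
--     items = []
--     for raw_value in raw_values:
--         if not raw_value:
--             continue
--         buf = []
--         for ch in str(raw_value):
--             if ch == ",":
--                 _flush(buf, items)
--                 buf = []
--             else:
--                 buf.append(ch)
--         _flush(buf, items)
--     return items
-- ===== Notes on version B (the rewrite author's own statement) =====
-- stated objective: alternative
-- what changed: Replaces split/strip library calls with a character-level scanner: one pass over each string's characters with a token buffer, flushing on ',' and at end, where the flush trims whitespace by popping from both ends before appending.
import Mathlib
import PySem

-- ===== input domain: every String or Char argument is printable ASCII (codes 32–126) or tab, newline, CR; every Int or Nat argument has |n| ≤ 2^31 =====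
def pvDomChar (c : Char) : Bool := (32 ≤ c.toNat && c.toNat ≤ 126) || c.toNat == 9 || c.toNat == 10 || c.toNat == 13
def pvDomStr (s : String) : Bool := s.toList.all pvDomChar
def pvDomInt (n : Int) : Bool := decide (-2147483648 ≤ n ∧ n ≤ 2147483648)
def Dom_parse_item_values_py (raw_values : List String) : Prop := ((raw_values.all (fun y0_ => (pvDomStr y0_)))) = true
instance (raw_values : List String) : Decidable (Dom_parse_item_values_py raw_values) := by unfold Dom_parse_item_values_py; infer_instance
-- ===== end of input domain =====

-- B replaces A's split/strip pipeline by a character-level scanner with a token buffer, flushing on ',' and trimming by popping whitespace from both ends (same cost, different algorithmic structure).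


-- ===== PORT A =====
def parse_item_values_py (raw_values : List String) : List String :=
  raw_values.foldl (fun items raw_value =>
    if raw_value = "" then items   -- 'if not raw_value: continue'
    else ((PySem.Str.split? raw_value ",").getD []).foldl   -- sep "," nonempty, split? never none
      (fun items v =>
        let value := PySem.Str.strip v
        if value ≠ "" then items ++ [value] else items) items) []

-- ===== PORT B =====
-- 'while buf and buf[0].isspace(): buf.pop(0)'
def pvDropLead : List Char → List Char
  | [] => []
  | c :: rest => if PySem.Chars.isspace c then pvDropLead rest else c :: rest

-- _flush: trim whitespace from both ends of the buffer, append if nonempty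
def pvFlush (buf : List Char) (items : List String) : List String :=
  let b1 := pvDropLead buf
  -- 'while buf and buf[-1].isspace(): buf.pop()' = drop leading spaces of the reverse
  let b2 := (pvDropLead b1.reverse).reverse
  if b2 = [] then items else items ++ [String.ofList b2]

-- the inner character loop: buffer chars, flush on ',' and at the end
def pvScan : List Char → List Char → List String → List String
  | [], buf, items => pvFlush buf items
  | c :: rest, buf, items =>
      if c = ',' then pvScan rest [] (pvFlush buf items)
      else pvScan rest (buf ++ [c]) items

def parse_item_values_py_alt (raw_values : List String) : List String :=
  raw_values.foldl (fun items raw_value =>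
    if raw_value = "" then items
    else pvScan raw_value.toList [] items) []

-- ===== PRECONDITION & SPEC =====
def Spec_parse_item_values_py (raw_values : List String) (out : List String) : Prop := out = parse_item_values_py_alt raw_values
instance (raw_values : List String) (out : List String) : Decidable (Spec_parse_item_values_py raw_values out) := by unfold Spec_parse_item_values_py; infer_instance

-- ===== CLAIM (what is proved, stated in full; the proofs are below) =====
def Claim_equal_parse_item_values_py : Prop := ∀ (raw_values : List String), Dom_parse_item_values_py raw_values → Spec_parse_item_values_py raw_values (parse_item_values_py raw_values)

-- ===== LEMMAS AND PROOFS =====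
theorem pvGo_single (c : Char) : ∀ (fuel : Nat) (l cur : List Char) (acc : List (List Char)),
    l.length ≤ fuel →
    PySem.Chars.splitOn.go [c] fuel l cur acc =
      acc.reverse ++ (l.splitOnP (· == c)).modifyHead (fun t => cur.reverse ++ t) := by
  intro fuel
  induction fuel with
  | zero =>
    intro l cur acc h
    have : l = [] := List.eq_nil_of_length_eq_zero (Nat.le_zero.mp h)
    subst this
    simp [PySem.Chars.splitOn.go, List.splitOnP_nil]
  | succ fuel ih =>
    intro l cur acc h
    cases l with
    | nil => simp [PySem.Chars.splitOn.go, List.splitOnP_nil]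
    | cons a rest =>
      rw [PySem.Chars.splitOn.go]
      by_cases hc : c = a
      · subst hc
        have h1 : [c].isPrefixOf (c :: rest) = true := by simp [List.isPrefixOf]
        rw [if_pos h1]
        rw [ih _ _ _ (by simpa using Nat.le_of_succ_le_succ h)]
        obtain ⟨hd, tl, hsp⟩ := List.exists_cons_of_ne_nil (List.splitOnP_ne_nil (· == c) rest)
        simp [List.splitOnP_cons, hsp]
      · have h1 : [c].isPrefixOf (a :: rest) = false := by
          simp [List.isPrefixOf, hc]
        rw [if_neg (by simp [h1])]
        rw [ih _ _ _ (by simpa using Nat.le_of_succ_le_succ h)]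
        obtain ⟨hd, tl, hsp⟩ := List.exists_cons_of_ne_nil (List.splitOnP_ne_nil (· == c) rest)
        have ha : (a == c) = false := by simp; exact fun h => hc h.symm
        simp [List.splitOnP_cons, hsp, ha]

def pvSplitC (s : List Char) : List (List Char) := s.splitOnP (· == ',')
def pvProcC (s : List Char) : List (List Char) :=
  ((pvSplitC s).map PySem.Chars.strip).filter (· ≠ [])

theorem pvSplitOn_single (c : Char) (l : List Char) :
    PySem.Chars.splitOn l [c] = l.splitOnP (· == c) := by
  rw [PySem.Chars.splitOn, pvGo_single c _ _ _ _ (Nat.le_succ_of_le (Nat.le_refl _))]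
  obtain ⟨hd, tl, hsp⟩ := List.exists_cons_of_ne_nil (List.splitOnP_ne_nil (· == c) l)
  simp [hsp]

theorem pvSplit_comma (s : String) :
    ((PySem.Str.split? s ",").getD []) = (pvSplitC s.toList).map String.ofList := by
  rw [PySem.Str.split?, PySem.Chars.split?]
  have : (",".toList) = [','] := rfl
  simp [this, pvSplitOn_single, pvSplitC]

theorem pvStrip_ofList (l : List Char) :
    PySem.Str.strip (String.ofList l) = String.ofList (PySem.Chars.strip l) := by
  rw [← String.ofList_toList (s := PySem.Str.strip (String.ofList l)), PySem.Str.toList_strip,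
    String.toList_ofList]

theorem pvInner (pieces : List String) (acc : List String) :
    pieces.foldl (fun items v =>
        let value := PySem.Str.strip v
        if value ≠ "" then items ++ [value] else items) acc =
      acc ++ (pieces.map PySem.Str.strip).filter (fun v => v ≠ "") := by
  induction pieces generalizing acc with
  | nil => simp
  | cons p ps ih =>
    simp only [List.foldl_cons]
    rw [ih]
    by_cases h : PySem.Str.strip p = "" <;> simp [h]

theorem pvProcStr (rv : String) :
    ((((PySem.Str.split? rv ",").getD []).map PySem.Str.strip).filter (fun v => v ≠ "")) =
      (pvProcC rv.toList).map String.ofList := by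
  rw [pvSplit_comma, List.map_map, pvProcC]
  have hmap : PySem.Str.strip ∘ String.ofList = String.ofList ∘ PySem.Chars.strip := by
    funext l; simp [pvStrip_ofList]
  rw [hmap, ← List.map_map, List.filter_map]
  congr 1
  apply List.filter_congr
  intro t _
  simp

theorem pvA_flatMap (rvs : List String) (acc : List String) :
    rvs.foldl (fun items raw_value =>
      if raw_value = "" then items
      else ((PySem.Str.split? raw_value ",").getD []).foldl
        (fun items v =>
          let value := PySem.Str.strip v
          if value ≠ "" then items ++ [value] else items) items) acc =
      acc ++ (rvs.filter (fun rv => rv ≠ "")).flatMap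
        (fun rv => (pvProcC rv.toList).map String.ofList) := by
  induction rvs generalizing acc with
  | nil => simp
  | cons rv rvs ih =>
    simp only [List.foldl_cons]
    by_cases h : rv = ""
    · subst h; rw [ih]; simp
    · rw [if_neg h, pvInner, ih]
      rw [List.filter_cons_of_pos (by simp [h]), List.flatMap_cons, ← pvProcStr]
      simp [List.append_assoc]

-- B-side lemmas
theorem pvDropLead_eq (l : List Char) : pvDropLead l = l.dropWhile PySem.Chars.isspace := by
  induction l with
  | nil => rfl
  | cons c rest ih =>
    by_cases h : PySem.Chars.isspace c
    · simp [pvDropLead, h, ih]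
    · simp [pvDropLead, h]

theorem pvFlush_eq (buf : List Char) (items : List String) :
    pvFlush buf items =
      if PySem.Chars.strip buf = [] then items
      else items ++ [String.ofList (PySem.Chars.strip buf)] := by
  have hs : PySem.Chars.strip buf = (pvDropLead (pvDropLead buf).reverse).reverse := by
    simp [PySem.Chars.strip, PySem.Chars.lstrip, PySem.Chars.rstrip, pvDropLead_eq]
  rw [pvFlush, hs]

theorem pvSplitOnP_no_comma (buf : List Char) (h : ',' ∉ buf) :
    buf.splitOnP (· == ',') = [buf] := by
  induction buf with
  | nil => exact List.splitOnP_nil _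
  | cons c rest ih =>
    have hc : (c == ',') = false := by
      refine beq_eq_false_iff_ne.mpr ?_
      intro hh; exact h (by simp [hh])
    have hrest := ih (fun hm => h (List.mem_cons_of_mem _ hm))
    simp [List.splitOnP_cons, hc, hrest]

theorem pvProcC_sep (xs ys : List Char) :
    pvProcC (xs ++ ',' :: ys) = pvProcC xs ++ pvProcC ys := by
  rw [pvProcC, pvSplitC, List.splitOnP_append_cons _ _ _ ',' (by simp)]
  simp [pvProcC, pvSplitC]

theorem pvScan_eq (l : List Char) : ∀ (buf : List Char) (items : List String), ',' ∉ buf →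
    pvScan l buf items = items ++ (pvProcC (buf ++ l)).map String.ofList := by
  induction l with
  | nil =>
    intro buf items h
    rw [pvScan, pvFlush_eq, pvProcC, pvSplitC]
    simp only [List.append_nil]
    rw [pvSplitOnP_no_comma buf h]
    by_cases hs : PySem.Chars.strip buf = [] <;> simp [hs]
  | cons c rest ih =>
    intro buf items h
    by_cases hc : c = ','
    · subst hc
      rw [pvScan, if_pos rfl, ih [] (pvFlush buf items) (List.not_mem_nil), pvFlush_eq, pvProcC_sep]
      have hb : pvProcC buf = if PySem.Chars.strip buf = [] then [] else [PySem.Chars.strip buf] := by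
        rw [pvProcC, pvSplitC, pvSplitOnP_no_comma buf h]
        by_cases hs : PySem.Chars.strip buf = [] <;> simp [hs]
      rw [hb]
      by_cases hs : PySem.Chars.strip buf = [] <;> simp [hs]
    · have hnc : ',' ∉ buf ++ [c] := by
        intro hm
        rcases List.mem_append.mp hm with hm | hm
        · exact h hm
        · exact hc ((List.mem_singleton.mp hm).symm)
      rw [pvScan, if_neg hc, ih (buf ++ [c]) items hnc]
      simp

theorem pvB_flatMap (rvs : List String) (acc : List String) :
    rvs.foldl (fun items raw_value =>
      if raw_value = "" then items
      else pvScan raw_value.toList [] items) acc =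
      acc ++ (rvs.filter (fun rv => rv ≠ "")).flatMap
        (fun rv => (pvProcC rv.toList).map String.ofList) := by
  induction rvs generalizing acc with
  | nil => simp
  | cons rv rvs ih =>
    simp only [List.foldl_cons]
    by_cases h : rv = ""
    · subst h; rw [ih]; simp
    · rw [if_neg h, pvScan_eq _ [] _ (List.not_mem_nil), ih]
      rw [List.filter_cons_of_pos (by simp [h]), List.flatMap_cons]
      simp [List.append_assoc]

-- ===== VERDICT (by name: the statement is the Claim_ definition above) =====
theorem parse_item_values_py_spec : Claim_equal_parse_item_values_py := by
  intro raw_values _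
  unfold Spec_parse_item_values_py parse_item_values_py parse_item_values_py_alt
  rw [pvA_flatMap, pvB_flatMap]
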